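-- pv_equiv track=rewrite | github.com/Yelp/paasta | paasta_tools/contrib/graceful_container_drain.py | get_last_killed
-- ===== SOURCE A (Python) =====
-- def get_last_killed(drained_apps, service, instance):
--     """look "back" in drained_apps, find at what time
--     the given (service, instance) was last killed"""
--     last_killed_t = -1000
--     for drained_app in reversed(drained_apps):
--         dt, dservice, dinstance = drained_app
--         if dservice == service and dinstance == instance:
--             last_killed_t = dt
--             break
--     return last_killed_t
-- ===== SOURCE B (Python) =====
-- def get_last_killed(drained_apps, service, instance):
--     last_killed_t = -1000
--     for dt, dservice, dinstance in drained_apps: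
--         if dservice == service and dinstance == instance:
--             last_killed_t = dt
--     return last_killed_t
-- ===== Notes on version B (the rewrite author's own statement) =====
-- stated objective: simpler
-- what changed: Single forward fold that overwrites the accumulator on each match, instead of scanning the reversed list and breaking at the first match.
import Mathlib
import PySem

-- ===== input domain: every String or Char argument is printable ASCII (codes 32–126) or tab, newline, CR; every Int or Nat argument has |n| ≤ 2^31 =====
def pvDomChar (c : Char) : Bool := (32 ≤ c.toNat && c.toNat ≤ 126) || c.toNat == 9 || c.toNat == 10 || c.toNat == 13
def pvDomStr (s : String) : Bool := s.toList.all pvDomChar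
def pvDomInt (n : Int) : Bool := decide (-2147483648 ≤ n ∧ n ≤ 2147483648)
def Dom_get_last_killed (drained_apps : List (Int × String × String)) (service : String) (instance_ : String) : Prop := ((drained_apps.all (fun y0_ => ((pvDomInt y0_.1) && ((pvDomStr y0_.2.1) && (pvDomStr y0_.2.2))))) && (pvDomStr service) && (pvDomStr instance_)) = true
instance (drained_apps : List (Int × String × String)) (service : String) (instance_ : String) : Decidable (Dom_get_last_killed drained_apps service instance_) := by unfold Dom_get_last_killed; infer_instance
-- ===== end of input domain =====

-- B replaces A's reversed scan with early break by a single forward pass that keeps the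
-- most recent matching time; objective: simpler (same O(n) cost, no reversal or break).


-- ===== PORT A =====
-- the loop over reversed(drained_apps) with break: return at the first match, else keep -1000
def get_last_killed_loopA (service instance_ : String) : List (Int × String × String) → Int
  | [] => -1000
  | (dt, dservice, dinstance) :: rest =>
    if dservice = service ∧ dinstance = instance_ then dt
    else get_last_killed_loopA service instance_ rest

def get_last_killed (drained_apps : List (Int × String × String)) (service : String) (instance_ : String) : Int :=
  get_last_killed_loopA service instance_ drained_apps.reverse

-- ===== PORT B =====
def get_last_killed_alt (drained_apps : List (Int × String × String)) (service : String) (instance_ : String) : Int :=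
  drained_apps.foldl
    (fun last_killed_t p =>
      if p.2.1 = service ∧ p.2.2 = instance_ then p.1 else last_killed_t)
    (-1000)

-- ===== PRECONDITION & SPEC =====
def Spec_get_last_killed (drained_apps : List (Int × String × String)) (service : String) (instance_ : String) (out : Int) : Prop := out = get_last_killed_alt drained_apps service instance_
instance (drained_apps : List (Int × String × String)) (service : String) (instance_ : String) (out : Int) : Decidable (Spec_get_last_killed drained_apps service instance_ out) := by unfold Spec_get_last_killed; infer_instance

-- ===== CLAIM (what is proved, stated in full; the proofs are below) =====
def Claim_equal_get_last_killed : Prop := ∀ (drained_apps : List (Int × String × String)) (service : String) (instance_ : String), Dom_get_last_killed drained_apps service instance_ → Spec_get_last_killed drained_apps service instance_ (get_last_killed drained_apps service instance_)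

-- ===== LEMMAS AND PROOFS =====

theorem loopA_eq_foldr (service instance_ : String) :
    ∀ (l : List (Int × String × String)),
      get_last_killed_loopA service instance_ l
        = l.foldr (fun p acc => if p.2.1 = service ∧ p.2.2 = instance_ then p.1 else acc) (-1000) := by
  intro l
  induction l with
  | nil => rfl
  | cons x l ih =>
    obtain ⟨dt, ds, di⟩ := x
    simp only [get_last_killed_loopA, List.foldr, ih]

theorem eq_of_ports (drained_apps : List (Int × String × String)) (service instance_ : String) :
    get_last_killed drained_apps service instance_ = get_last_killed_alt drained_apps service instance_ := by
  unfold get_last_killed get_last_killed_alt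
  rw [loopA_eq_foldr, List.foldr_reverse]

-- ===== VERDICT (by name: the statement is the Claim_ definition above) =====
theorem get_last_killed_spec : Claim_equal_get_last_killed := by
  intro d s i _
  exact eq_of_ports d s i
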